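-- pv_equiv track=rewrite | github.com/djani2703/OSSU | 1. Intro CS/2. Introduction to CS using Python/6. Recursion and Dictionaries/lecture6.py | most_commot_words
-- ===== SOURCE A (Python) =====
-- def most_commot_words(freqs):
--     values = freqs.values()
--     best = max(values)
--     words = []
--     for k in freqs:
--         if freqs[k] == best:
--             words.append(k)
--     return (words, best)
-- ===== SOURCE B (Python) =====
-- def most_commot_words(freqs):
--     best = None
--     words = []
--     for k, v in freqs.items():
--         if best is None or v > best:
--             best = v
--             words = [k]
--         elif v == best:
--             words.append(k)
--     return (words, best)
-- ===== Notes on version B (the rewrite author's own statement) =====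
-- stated objective: alternative
-- what changed: Replaces the compute-max-then-filter-with-dict-lookups pattern by a single running-max pass over items() that resets the word list whenever a new maximum appears.
import Mathlib
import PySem

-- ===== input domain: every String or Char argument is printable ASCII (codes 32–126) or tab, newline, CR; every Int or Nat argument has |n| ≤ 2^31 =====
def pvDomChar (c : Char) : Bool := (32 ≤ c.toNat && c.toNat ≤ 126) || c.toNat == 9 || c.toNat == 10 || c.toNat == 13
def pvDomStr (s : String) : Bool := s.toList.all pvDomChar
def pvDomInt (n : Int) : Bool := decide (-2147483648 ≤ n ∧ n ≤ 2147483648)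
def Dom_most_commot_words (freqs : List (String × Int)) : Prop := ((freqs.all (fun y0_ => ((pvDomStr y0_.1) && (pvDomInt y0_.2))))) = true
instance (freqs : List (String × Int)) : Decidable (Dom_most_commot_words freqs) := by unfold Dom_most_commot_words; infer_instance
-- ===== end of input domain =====

-- B replaces A's max-then-filter (with a dict lookup per key) by one running-max pass over the items.

-- ===== PORT A =====
-- freqs[k]: first-match association-list lookup (exact for a Python dict, whose keys are unique)
def pvLookup (freqs : List (String × Int)) (k : String) : Option Int :=
  (freqs.find? (fun p => p.1 == k)).map Prod.snd

def most_commot_words (freqs : List (String × Int)) : List String × Int :=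
  match PySem.List.max? (freqs.map Prod.snd) (fun v => v) with
  | none => ([], 0)   -- unreachable under Pre_: Python's max raises ValueError on an empty dict
  | some best =>
    let words := (freqs.map Prod.fst).foldl
      (fun ws k => if pvLookup freqs k = some best then ws ++ [k] else ws) []
    (words, best)

-- ===== PORT B =====
def pvStep (st : List String × Option Int) (p : String × Int) : List String × Option Int :=
  match st.2 with
  | none => ([p.1], some p.2)
  | some b =>
    if p.2 > b then ([p.1], some p.2)
    else if p.2 = b then (st.1 ++ [p.1], some b)
    else st

def most_commot_words_alt (freqs : List (String × Int)) : List String × Int :=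
  match freqs.foldl pvStep ([], none) with
  | (ws, some b) => (ws, b)
  | (ws, none) => (ws, 0)   -- unreachable under Pre_: Python B returns (words, None) on an empty dict

-- ===== PRECONDITION & SPEC =====
-- Pre_ excludes the empty dict, on which A raises ValueError, and association lists with
-- duplicate keys, which do not represent a Python dict (A's argument is a dict).
def Pre_most_commot_words (freqs : List (String × Int)) : Prop :=
  freqs ≠ [] ∧ (freqs.map Prod.fst).Nodup
instance (freqs : List (String × Int)) : Decidable (Pre_most_commot_words freqs) := by
  unfold Pre_most_commot_words; infer_instance

def pvWitness_most_commot_words : (List (String × Int)) := [("a", 2), ("b", 3), ("c", 3)]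

def Spec_most_commot_words (freqs : List (String × Int)) (out : List String × Int) : Prop := out = most_commot_words_alt freqs
instance (freqs : List (String × Int)) (out : List String × Int) : Decidable (Spec_most_commot_words freqs out) := by unfold Spec_most_commot_words; infer_instance

-- ===== CLAIM (what is proved, stated in full; the proofs are below) =====
def Claim_equal_most_commot_words : Prop := ∀ (freqs : List (String × Int)), Dom_most_commot_words freqs → Pre_most_commot_words freqs → Spec_most_commot_words freqs (most_commot_words freqs)

-- ===== LEMMAS AND PROOFS =====

-- With unique keys, looking a member pair's key up in the whole list returns its own value.
theorem pvLookup_mem (freqs : List (String × Int)) (hnd : (freqs.map Prod.fst).Nodup)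
    (p : String × Int) (hp : p ∈ freqs) : pvLookup freqs p.1 = some p.2 := by
  induction freqs with
  | nil => cases hp
  | cons q t ih =>
    simp only [List.map_cons, List.nodup_cons] at hnd
    rcases List.mem_cons.mp hp with hp | hp
    · subst hp; simp [pvLookup, List.find?]
    · have hne : ¬ (q.1 == p.1) = true := by
        intro h
        exact hnd.1 (by simpa [eq_comm, (beq_iff_eq ..).mp h] using List.mem_map_of_mem (f := Prod.fst) hp)
      simpa [pvLookup, List.find?, hne] using ih hnd.2 hp

-- A's loop over the keys, with lookups resolved, is a filter of the pairs.
theorem aLoop (freqs : List (String × Int)) (best : Int)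
    (l : List (String × Int)) (ws : List String)
    (h : ∀ p ∈ l, pvLookup freqs p.1 = some p.2) :
    (l.map Prod.fst).foldl
      (fun ws k => if pvLookup freqs k = some best then ws ++ [k] else ws) ws
    = ws ++ (l.filter (fun p => decide (p.2 = best))).map Prod.fst := by
  induction l generalizing ws with
  | nil => simp
  | cons p t ih =>
    have hp := h p (List.mem_cons_self ..)
    have ht : ∀ q ∈ t, pvLookup freqs q.1 = some q.2 := fun q hq => h q (List.mem_cons_of_mem _ hq)
    by_cases hv : p.2 = best
    · simp [hv, hp, ih _ ht]
    · simp [hv, hp, ih _ ht]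

-- B's loop from a live state computes the running max and the keys achieving it.
theorem bLoop (l : List (String × Int)) (ws : List String) (b : Int) :
    l.foldl pvStep (ws, some b)
    = ((if l.foldl (fun m p => max m p.2) b = b then ws else []) ++
        (l.filter (fun p => decide (p.2 = l.foldl (fun m p => max m p.2) b))).map Prod.fst,
       some (l.foldl (fun m p => max m p.2) b)) := by
  induction l generalizing ws b with
  | nil => simp
  | cons p t ih =>
    have hfold : (p :: t).foldl (fun m q => max m q.2) b
        = t.foldl (fun m q => max m q.2) (max b p.2) := rfl
    have hup : max b p.2 ≤ t.foldl (fun m q => max m q.2) (max b p.2) := by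
      have h2 := (PySem.List.le_foldl_max (t.map Prod.snd) (max b p.2)).1
      rwa [List.foldl_map] at h2
    rcases lt_trichotomy p.2 b with hv | hv | hv
    · -- p.2 < b : state unchanged, max unchanged
      have hmb : max b p.2 = b := by omega
      have hstep : pvStep (ws, some b) p = (ws, some b) := by
        simp only [pvStep]
        rw [if_neg (by omega), if_neg (by omega)]
      rw [List.foldl_cons, hstep, ih, hfold]
      simp only [hmb]
      rw [hmb] at hup
      have hne : ¬ (p.2 = t.foldl (fun m q => max m q.2) b) := by omega
      simp [hne]
    · -- p.2 = b : key appended; kept iff b is still the final max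
      subst hv
      have hstep : pvStep (ws, some p.2) p = (ws ++ [p.1], some p.2) := by
        simp [pvStep]
      rw [List.foldl_cons, hstep, ih, hfold]
      simp only [max_self]
      by_cases hb : t.foldl (fun m q => max m q.2) p.2 = p.2
      · simp [hb]
      · have hb' : ¬ (p.2 = t.foldl (fun m q => max m q.2) p.2) := fun h => hb h.symm
        simp [hb, hb']
    · -- p.2 > b : reset to ([p.1], p.2)
      have hmb : max b p.2 = p.2 := by omega
      have hstep : pvStep (ws, some b) p = ([p.1], some p.2) := by
        simp only [pvStep]
        rw [if_pos (by omega)]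
      rw [List.foldl_cons, hstep, ih, hfold]
      simp only [hmb]
      rw [hmb] at hup
      have hne : ¬ (t.foldl (fun m q => max m q.2) p.2 = b) := by omega
      rw [if_neg hne, List.filter_cons]
      by_cases hb : t.foldl (fun m q => max m q.2) p.2 = p.2
      · simp [hb]
      · have hb' : ¬ (p.2 = t.foldl (fun m q => max m q.2) p.2) := fun h => hb h.symm
        simp [hb, hb']

-- ===== VERDICT (by name: the statement is the Claim_ definition above) =====
theorem most_commot_words_spec : Claim_equal_most_commot_words := by
  intro freqs _ hpre
  obtain ⟨hne, hnd⟩ := hpre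
  unfold Spec_most_commot_words
  cases freqs with
  | nil => exact absurd rfl hne
  | cons p t =>
    have hmax : PySem.List.max? ((p :: t).map Prod.snd) (fun v => v)
        = some ((t.map Prod.snd).foldl max p.2) := by
      rw [List.map_cons, PySem.List.max?_id_cons]
    have hM : (t.map Prod.snd).foldl max p.2 = t.foldl (fun m q => max m q.2) p.2 := by
      rw [List.foldl_map]
    unfold most_commot_words most_commot_words_alt
    rw [hmax]
    have hlook : ∀ q ∈ p :: t, pvLookup (p :: t) q.1 = some q.2 :=
      fun q hq => pvLookup_mem _ hnd q hq
    simp only [List.foldl_cons]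
    have hstep0 : pvStep ([], none) p = ([p.1], some p.2) := rfl
    rw [hstep0, bLoop]
    have htail : ∀ q ∈ t, pvLookup (p :: t) q.1 = some q.2 :=
      fun q hq => hlook q (List.mem_cons_of_mem _ hq)
    rw [aLoop (p :: t) _ (p :: t) [] hlook]
    simp only [List.nil_append, List.filter_cons, hM]
    by_cases hb : p.2 = t.foldl (fun m q => max m q.2) p.2
    · simp [← hb]
    · have : ¬ t.foldl (fun m q => max m q.2) p.2 = p.2 := fun h => hb h.symm
      simp [hb, this]
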